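-- pv_equiv track=rewrite | github.com/nanyeglm/ncbi_download | endolysin_database.py | parse_genbank_records
-- ===== SOURCE A (Python) =====
-- def parse_genbank_records(data):
--     """解析GenBank格式数据，返回单个记录列表"""
--     # GenBank记录以//结尾分隔
--     records = []
--     current_record = []
--
--     for line in data.split('\n'):
--         current_record.append(line)
--         if line.strip() == '//':
--             if len(current_record) > 1:  # 确保不是空记录
--                 records.append('\n'.join(current_record))
--             current_record = []
--
--     # 处理最后一个记录（如果没有以//结尾）
--     if current_record and any(line.strip() for line in current_record):
--         records.append('\n'.join(current_record))
--
--     return records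
-- ===== SOURCE B (Python) =====
-- def parse_genbank_records(data):
--     """Index-then-slice decomposition: find delimiter line indices once, then cut slices."""
--     lines = data.split('\n')
--     delims = [i for i, line in enumerate(lines) if line.strip() == '//']
--     records = []
--     start = 0
--     for d in delims:
--         if d > start:
--             records.append('\n'.join(lines[start:d + 1]))
--         start = d + 1
--     tail = lines[start:]
--     if tail and any(line.strip() for line in tail):
--         records.append('\n'.join(tail))
--     return records
-- ===== Notes on version B (the rewrite author's own statement) =====
-- stated objective: alternative
-- what changed: B splits the text into lines once, collects the indices of the GenBank record-delimiter lines in a separate pass, then cuts each record out with a start-cursor slice, instead of A's single accumulate-while-scanning loop that grows a current-record list and flushes it at each delimiter.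
import Mathlib
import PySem

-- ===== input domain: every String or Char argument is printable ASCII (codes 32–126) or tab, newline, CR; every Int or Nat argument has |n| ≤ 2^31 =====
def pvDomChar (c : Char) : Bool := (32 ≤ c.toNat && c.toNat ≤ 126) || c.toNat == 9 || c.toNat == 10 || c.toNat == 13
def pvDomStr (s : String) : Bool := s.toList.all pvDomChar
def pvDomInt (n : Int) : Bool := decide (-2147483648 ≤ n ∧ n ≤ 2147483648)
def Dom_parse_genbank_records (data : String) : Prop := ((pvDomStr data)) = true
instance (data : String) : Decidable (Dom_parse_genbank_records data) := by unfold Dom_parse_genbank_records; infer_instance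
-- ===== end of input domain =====

-- B re-parses by a different decomposition (collect '//' line indices once, then cut slices with a
-- start cursor) instead of A's accumulate-while-scanning loop; same cost, objective: alternative.

-- ===== PORT A =====
-- data.split('\n') (non-empty separator), exact via PySem.Chars.splitOn on the code points.
def pvSplitLines (data : String) : List String :=
  (PySem.Chars.splitOn data.toList "\n".toList).map String.ofList

-- A's loop body: append line to current record; on a '//' line flush (if more than the delimiter).
def pvStepA (st : List String × List String) (line : String) : List String × List String :=
  let cur := st.2 ++ [line]
  if PySem.Str.strip line == "//" then
    (if cur.length > 1 then st.1 ++ [PySem.Str.join "\n" cur] else st.1, [])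
  else (st.1, cur)

-- A's trailing-record handling after the loop.
def pvFinalA (st : List String × List String) : List String :=
  if st.2 ≠ [] ∧ st.2.any (fun l => PySem.Str.strip l ≠ "") then
    st.1 ++ [PySem.Str.join "\n" st.2]
  else st.1

def parse_genbank_records (data : String) : List String :=
  pvFinalA ((pvSplitLines data).foldl pvStepA ([], []))

-- ===== PORT B =====
-- B's loop body over the delimiter indices: emit lines[start:d+1] when d > start, move start to d+1.
def pvStepB (lines : List String) (st : Int × List String) (d : Int) : Int × List String :=
  if d > st.1 then
    (d + 1, st.2 ++ [PySem.Str.join "\n" (PySem.List.slice lines (some st.1) (some (d + 1)))])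
  else (d + 1, st.2)

-- B's tail handling: tail = lines[start:], appended if non-empty and not all blank.
def pvFinalB (lines : List String) (st : Int × List String) : List String :=
  let tail := PySem.List.slice lines (some st.1) none
  if tail ≠ [] ∧ tail.any (fun l => PySem.Str.strip l ≠ "") then
    st.2 ++ [PySem.Str.join "\n" tail]
  else st.2

def parse_genbank_records_alt (data : String) : List String :=
  let lines := pvSplitLines data
  let delims := ((PySem.List.enumerate lines 0).filter
      (fun q => PySem.Str.strip q.2 == "//")).map (·.1)
  pvFinalB lines (delims.foldl (pvStepB lines) (0, []))

-- ===== PRECONDITION & SPEC =====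
def Spec_parse_genbank_records (data : String) (out : List String) : Prop := out = parse_genbank_records_alt data
instance (data : String) (out : List String) : Decidable (Spec_parse_genbank_records data out) := by unfold Spec_parse_genbank_records; infer_instance

-- ===== CLAIM (what is proved, stated in full; the proofs are below) =====
def Claim_equal_parse_genbank_records : Prop := ∀ (data : String), Dom_parse_genbank_records data → Spec_parse_genbank_records data (parse_genbank_records data)

-- ===== LEMMAS AND PROOFS =====

-- When the remaining lines are exhausted, A's current record is all of lines[start:].
lemma pv_take_all (full : List String) (s k : Nat) (hsk : s ≤ k) (h : full.drop k = []) :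
    (full.drop s).take (k - s) = full.drop s := by
  apply List.take_of_length_le
  have : full.length ≤ k := by
    have := List.drop_eq_nil_iff.mp h
    omega
  simp [List.length_drop]; omega

-- Extending A's current record by the line at index k is taking one more element of lines[start:].
lemma pv_take_succ (full : List String) (s k : Nat) (l : String) (ls : List String)
    (hsk : s ≤ k) (h : full.drop k = l :: ls) :
    (full.drop s).take (k + 1 - s) = (full.drop s).take (k - s) ++ [l] := by
  have hk : full[k]? = some l := by
    rw [← Nat.add_zero k, ← List.getElem?_drop, h]
    rfl
  have hstep : k + 1 - s = (k - s) + 1 := by omega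
  rw [hstep, List.take_add_one]
  have hget : (full.drop s)[k - s]? = some l := by
    rw [List.getElem?_drop]
    have hss : s + (k - s) = k := by omega
    rw [hss, hk]
  simp [hget]

lemma pv_drop_succ (full : List String) (k : Nat) (l : String) (ls : List String)
    (h : full.drop k = l :: ls) : full.drop (k + 1) = ls := by
  have : full.drop (k + 1) = (full.drop k).drop 1 := by
    rw [List.drop_drop]
  simp [this, h]

lemma pv_len_cur (full : List String) (s k : Nat) (hk : k < full.length) :
    ((full.drop s).take (k - s)).length = k - s := by
  simp [List.length_take, List.length_drop]; omega

-- Main invariant: after any prefix has been processed, A's (records, current) state and B's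
-- (start, records) state finish to the same list.  'tail' is the unprocessed suffix full.drop k,
-- A's current record is lines[s:k], B's start cursor is s.
lemma pv_main (full : List String) (tail : List String) : ∀ (s k : Nat) (recs : List String),
    s ≤ k → full.drop k = tail →
    pvFinalA (tail.foldl pvStepA (recs, (full.drop s).take (k - s)))
      = pvFinalB full
          ((((PySem.List.enumerate tail (k : Int)).filter
              (fun q => PySem.Str.strip q.2 == "//")).map (·.1)).foldl
            (pvStepB full) (((s : Nat) : Int), recs)) := by
  induction tail with
  | nil =>
    intro s k recs hsk h
    rw [pv_take_all full s k hsk h]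
    simp only [PySem.List.enumerate_nil, List.filter_nil, List.map_nil, List.foldl_nil]
    simp [pvFinalA, pvFinalB, PySem.List.slice_from_natCast]
  | cons l ls ih =>
    intro s k recs hsk h
    have hk : k < full.length := by
      by_contra hle
      have hnil : full.drop k = [] := List.drop_eq_nil_iff.mpr (by omega)
      rw [h] at hnil
      simp at hnil
    have hdrop : full.drop (k + 1) = ls := pv_drop_succ full k l ls h
    rw [PySem.List.enumerate_cons]
    by_cases hp : PySem.Str.strip l == "//"
    · -- delimiter line at index k
      simp only [List.filter_cons, hp, if_true, List.map_cons, List.foldl_cons]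
      have hcurlen := pv_len_cur full s k hk
      have hcast2 : ((k:Int)) + 1 = (((k + 1 : Nat)) : Int) := by push_cast; ring
      have hslice : PySem.List.slice full (some ((s : Nat) : Int)) (some ((k:Int) + 1))
          = (full.drop s).take (k - s) ++ [l] := by
        rw [hcast2, PySem.List.slice_natCast]
        exact pv_take_succ full s k l ls hsk h
      have hBd : pvStepB full (((s : Nat) : Int), recs) ((k : Int))
          = ((((k+1 : Nat)) : Int),
             recs ++ (if s < k then [PySem.Str.join "\n" ((full.drop s).take (k - s) ++ [l])] else [])) := by
        simp only [pvStepB]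
        by_cases hlt : s < k
        · have hgt : ((k : Int)) > ((s:Nat):Int) := by exact_mod_cast hlt
          rw [if_pos hgt, if_pos hlt, hslice, hcast2]
        · have hgt : ¬ ((k : Int)) > ((s:Nat):Int) := by
            simp only [gt_iff_lt, not_lt]; exact_mod_cast Nat.le_of_not_lt hlt
          rw [if_neg hgt, if_neg hlt, hcast2]
          simp
      rw [hBd]
      have hA : pvStepA (recs, (full.drop s).take (k - s)) l
          = (recs ++ (if s < k then [PySem.Str.join "\n" ((full.drop s).take (k - s) ++ [l])] else []), []) := by
        simp only [pvStepA, hp, if_true]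
        by_cases hlt : s < k
        · have hlen : ((full.drop s).take (k - s) ++ [l]).length > 1 := by
            rw [List.length_append, hcurlen]
            simp
            omega
          rw [if_pos hlen, if_pos hlt]
        · have hnil : (full.drop s).take (k - s) = [] := by
            have h0 : k - s = 0 := by omega
            rw [h0]
            rfl
          rw [hnil]
          simp [hlt]
      rw [hA]
      have := ih (k + 1) (k + 1) (recs ++ (if s < k then [PySem.Str.join "\n" ((full.drop s).take (k - s) ++ [l])] else [])) (le_refl _) hdrop
      simpa using this
    · -- ordinary line at index k
      simp only [List.filter_cons, hp, Bool.false_eq_true, if_false]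
      have hA : pvStepA (recs, (full.drop s).take (k - s)) l
          = (recs, (full.drop s).take (k + 1 - s)) := by
        simp only [pvStepA, hp]
        rw [pv_take_succ full s k l ls hsk h]
        simp
      rw [List.foldl_cons, hA]
      have hcast : ((k:Int)) + 1 = (((k + 1 : Nat)) : Int) := by push_cast; ring
      rw [hcast]

      exact ih s (k + 1) recs (by omega) hdrop

-- ===== VERDICT (by name: the statement is the Claim_ definition above) =====
theorem parse_genbank_records_spec : Claim_equal_parse_genbank_records := by
  intro data _
  unfold Spec_parse_genbank_records parse_genbank_records parse_genbank_records_alt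
  have := pv_main (pvSplitLines data) (pvSplitLines data) 0 0 [] (le_refl 0) (by simp)
  simpa using this
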